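-- pv_equiv track=rewrite | github.com/paiml/depyler | examples/hard_combo_bell.py | bell_triangle_row
-- ===== SOURCE A (Python) =====
-- def bell_triangle_row(n: int) -> list[int]:
--     """Compute nth row of Bell triangle. First element is B(n)."""
--     if n == 0:
--         return [1]
--     prev: list[int] = bell_triangle_row(n - 1)
--     np: int = len(prev)
--     last_prev: int = prev[np - 1]
--     row: list[int] = [last_prev]
--     i: int = 0
--     while i < np:
--         nxt: int = row[i] + prev[i]
--         row.append(nxt)
--         i = i + 1
--     return row
-- ===== SOURCE B (Python) =====
-- def bell_triangle_row(n: int) -> list[int]: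
--     """Compute nth row of Bell triangle. First element is B(n)."""
--     row = [1]
--     for _ in range(n):
--         acc = row[-1]
--         new = [acc]
--         for x in row:
--             acc += x
--             new.append(acc)
--         row = new
--     return row
-- ===== Notes on version B (the rewrite author's own statement) =====
-- stated objective: simpler
-- what changed: Replaces A's downward recursion with indexed self-referential appends by a bottom-up loop that builds each next row as a running-sum scan over the previous row with a plain accumulator (no recursion, no indexing).
import Mathlib
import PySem

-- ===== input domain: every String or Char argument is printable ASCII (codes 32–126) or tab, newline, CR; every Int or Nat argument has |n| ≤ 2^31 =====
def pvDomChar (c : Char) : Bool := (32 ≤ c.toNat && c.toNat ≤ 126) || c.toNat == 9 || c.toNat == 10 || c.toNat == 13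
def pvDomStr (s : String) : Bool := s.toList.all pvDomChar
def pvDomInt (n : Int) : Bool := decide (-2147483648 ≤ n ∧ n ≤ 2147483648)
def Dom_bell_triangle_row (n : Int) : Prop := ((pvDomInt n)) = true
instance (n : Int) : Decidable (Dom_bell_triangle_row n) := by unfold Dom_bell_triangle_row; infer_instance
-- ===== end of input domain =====

-- B replaces A's downward recursion (which appends row[i] + prev[i] by index) with a
-- bottom-up loop building each next row as a running-sum scan with an accumulator (objective: simpler).

-- ===== PORT A =====
-- A's inner 'while i < np' loop; row[i] and prev[i] are nonnegative in-range indices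
-- throughout A's execution, so List.getD is exact for them.
def pvWhileA (prev : List Int) (row : List Int) (i : Nat) : List Int :=
  if _h : i < prev.length then
    pvWhileA prev (row ++ [row.getD i 0 + prev.getD i 0]) (i + 1)
  else row
termination_by prev.length - i

-- A's recursion on n (n ≥ 0 on every input A returns on; n.toNat realises it)
def pvBellA : Nat → List Int
  | 0 => [1]
  | k + 1 =>
    let prev := pvBellA k
    let np := prev.length
    let last_prev := prev.getD (np - 1) 0   -- prev[np - 1], in range: prev is nonempty
    pvWhileA prev [last_prev] 0

def bell_triangle_row (n : Int) : List Int := pvBellA n.toNat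

-- ===== PORT B =====
-- Source B's inner 'for x in row: acc += x; new.append(acc)'
def pvScanB (acc : Int) (xs : List Int) : List Int :=
  match xs with
  | [] => []
  | x :: t => (acc + x) :: pvScanB (acc + x) t

-- one iteration of Source B's outer loop; row[-1] is exact via getLast? (row is always nonempty)
def pvStepB (row : List Int) : List Int :=
  let acc := row.getLast?.getD 0
  acc :: pvScanB acc row

-- 'for _ in range(n)': n.toNat iterations (empty for n ≤ 0)
def pvIterB : Nat → List Int → List Int
  | 0, row => row
  | k + 1, row => pvIterB k (pvStepB row)

def bell_triangle_row_alt (n : Int) : List Int := pvIterB n.toNat [1]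

-- ===== PRECONDITION & SPEC =====
-- Pre_ excludes n < 0, on which A recurses without a base case and raises RecursionError.
def Pre_bell_triangle_row (n : Int) : Prop := 0 ≤ n
instance (n : Int) : Decidable (Pre_bell_triangle_row n) := by unfold Pre_bell_triangle_row; infer_instance
def pvWitness_bell_triangle_row : Int := (5)

def Spec_bell_triangle_row (n : Int) (out : List Int) : Prop := out = bell_triangle_row_alt n
instance (n : Int) (out : List Int) : Decidable (Spec_bell_triangle_row n out) := by unfold Spec_bell_triangle_row; infer_instance

-- ===== CLAIM (what is proved, stated in full; the proofs are below) =====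
def Claim_equal_bell_triangle_row : Prop := ∀ (n : Int), Dom_bell_triangle_row n → Pre_bell_triangle_row n → Spec_bell_triangle_row n (bell_triangle_row n)

-- ===== LEMMAS AND PROOFS =====

-- A's append-by-index loop is B's running-sum scan of the not-yet-consumed part of prev.
theorem pvWhileA_eq_scan (prev : List Int) :
    ∀ (j i : Nat) (row : List Int), prev.length - i ≤ j → row.length = i + 1 →
      pvWhileA prev row i = row ++ pvScanB (row.getD i 0) (prev.drop i) := by
  intro j
  induction j with
  | zero =>
    intro i row hle hlen
    have hge : prev.length ≤ i := by omega
    rw [pvWhileA]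
    simp [Nat.not_lt.mpr hge, List.drop_eq_nil_of_le hge, pvScanB]
  | succ j ih =>
    intro i row hle hlen
    by_cases h : i < prev.length
    · rw [pvWhileA]
      rw [dif_pos h]
      have hrec := ih (i + 1) (row ++ [row.getD i 0 + prev.getD i 0]) (by omega) (by simp [hlen])
      rw [hrec]
      have hgetnew : (row ++ [row.getD i 0 + prev.getD i 0]).getD (i + 1) 0
          = row.getD i 0 + prev.getD i 0 := by
        simp [List.getD_eq_getElem?_getD, hlen]
      have hdrop : prev.drop i = prev[i] :: prev.drop (i + 1) := List.drop_eq_getElem_cons h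
      have hgd : prev.getD i 0 = prev[i] := by
        simp [List.getD_eq_getElem?_getD, List.getElem?_eq_getElem h]
      rw [hgetnew, hdrop, pvScanB, hgd]
      simp
    · rw [pvWhileA]
      have hge : prev.length ≤ i := Nat.not_lt.mp h
      simp [h, List.drop_eq_nil_of_le hge, pvScanB]

theorem pvBellA_succ (k : Nat) : pvBellA (k + 1) = pvStepB (pvBellA k) := by
  show pvWhileA (pvBellA k) [(pvBellA k).getD ((pvBellA k).length - 1) 0] 0 = _
  rw [pvWhileA_eq_scan (pvBellA k) (pvBellA k).length 0 _ (by omega) rfl]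
  have hlast : (pvBellA k).getLast?.getD 0 = (pvBellA k).getD ((pvBellA k).length - 1) 0 := by
    rw [List.getLast?_eq_getElem?, List.getD_eq_getElem?_getD]
  simp [pvStepB, hlast]

theorem pvIterB_bellA (k m : Nat) : pvIterB k (pvBellA m) = pvBellA (m + k) := by
  induction k generalizing m with
  | zero => simp [pvIterB]
  | succ k ih =>
    rw [pvIterB, ← pvBellA_succ, ih]
    ring_nf

-- ===== VERDICT (by name: the statement is the Claim_ definition above) =====
theorem bell_triangle_row_spec : Claim_equal_bell_triangle_row := by
  intro n _ _
  show bell_triangle_row n = bell_triangle_row_alt n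
  show pvBellA n.toNat = pvIterB n.toNat [1]
  have := pvIterB_bellA n.toNat 0
  simpa [pvBellA] using this.symm
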